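-- pv_equiv track=rewrite | github.com/aveeresh/scripts | check_sws_ids.py | missingInSWS
-- ===== SOURCE A (Python) =====
-- def missingInSWS(Pdf_SWS_Ids, Excel_SWS_Ids):
-- 	MissingIds = []
--
-- 	for ExcelFileId in Excel_SWS_Ids:
-- 		Found = False
-- 		for PdfFileId in Pdf_SWS_Ids:
-- 			if PdfFileId in ExcelFileId:
-- 				Found = True
-- 				break
--
-- 		if Found==False:
-- 			MissingIds.append(ExcelFileId)
--
-- 	return(MissingIds)
-- ===== SOURCE B (Python) =====
-- def missingInSWS(Pdf_SWS_Ids, Excel_SWS_Ids):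
--     # Multi-pattern scan: bucket the Pdf ids by first character, then make one
--     # pass over each Excel id's positions, prefix-testing only the patterns
--     # whose first character matches the character at that position.
--     if "" in Pdf_SWS_Ids:
--         return []
--     index = {}
--     for p in Pdf_SWS_Ids:
--         index.setdefault(p[0], []).append(p)
--     missing = []
--     for e in Excel_SWS_Ids:
--         hit = False
--         for i in range(len(e)):
--             for p in index.get(e[i], ()):
--                 if e.startswith(p, i):
--                     hit = True
--                     break
--             if hit:
--                 break
--         if not hit:
--             missing.append(e)
--     return missing
-- ===== Notes on version B (the rewrite author's own statement) =====
-- stated objective: alternative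
-- what changed: A runs a library substring search for every (Excel id, Pdf id) pair with an early break; B buckets the Pdf ids by first character once and then makes a single positional scan over each Excel id, prefix-testing only the patterns whose first character matches the current position (and returns [] immediately if some Pdf id is empty, since the empty string is a substring of everything).
import Mathlib
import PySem

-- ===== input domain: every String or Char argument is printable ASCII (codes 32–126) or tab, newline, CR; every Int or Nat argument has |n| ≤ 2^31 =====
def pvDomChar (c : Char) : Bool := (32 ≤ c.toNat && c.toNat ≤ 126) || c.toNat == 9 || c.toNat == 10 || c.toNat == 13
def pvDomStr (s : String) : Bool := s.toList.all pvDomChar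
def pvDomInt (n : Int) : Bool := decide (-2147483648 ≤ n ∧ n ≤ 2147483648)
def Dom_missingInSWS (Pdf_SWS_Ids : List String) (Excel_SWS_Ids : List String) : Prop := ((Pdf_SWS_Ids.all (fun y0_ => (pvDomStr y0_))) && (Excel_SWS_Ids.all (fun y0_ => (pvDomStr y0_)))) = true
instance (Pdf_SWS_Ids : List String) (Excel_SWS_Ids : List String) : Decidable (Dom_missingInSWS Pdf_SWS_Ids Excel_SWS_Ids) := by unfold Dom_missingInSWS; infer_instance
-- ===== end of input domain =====

-- B replaces A's per-pattern substring searches by one positional scan per Excel id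
-- over first-character buckets of the Pdf ids (alternative algorithm, same return value).

-- ===== PORT A =====
-- inner 'for PdfFileId in Pdf_SWS_Ids: if PdfFileId in ExcelFileId: Found = True; break'
def pvFound (Pdf_SWS_Ids : List String) (ExcelFileId : String) : Bool :=
  match Pdf_SWS_Ids with
  | [] => false
  | PdfFileId :: rest =>
      if PySem.Str.isIn PdfFileId ExcelFileId then true else pvFound rest ExcelFileId

def missingInSWS (Pdf_SWS_Ids : List String) (Excel_SWS_Ids : List String) : List String :=
  Excel_SWS_Ids.foldl
    (fun MissingIds ExcelFileId =>
      if pvFound Pdf_SWS_Ids ExcelFileId = false then MissingIds ++ [ExcelFileId]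
      else MissingIds)
    []

-- ===== PORT B =====
-- 'index.setdefault(p[0], []).append(p)' — insert keeps a present key's position, appends a new one
-- (the [] branch is unreachable: "" was already returned on)
def pvBuildIdx (Pdf_SWS_Ids : List String) : PySem.Dict Char (List String) :=
  Pdf_SWS_Ids.foldl
    (fun index p =>
      match p.toList with
      | [] => index
      | c :: _ => index.insert c (index.getD c [] ++ [p]))
    PySem.Dict.empty

-- the flag loop 'for i in range(len(e)): for p in index.get(e[i], ()): if e.startswith(p, i): hit = True; break'
-- as any-over-any; e.startswith(p, i) with 0 ≤ i ≤ len(e) is exactly a prefix test on e[i:].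
def pvScan (index : PySem.Dict Char (List String)) (e : String) : Bool :=
  (List.range e.toList.length).any (fun i =>
    (index.getD (e.toList.getD i ' ') []).any (fun p =>
      PySem.Chars.startswith (e.toList.drop i) p.toList))

def missingInSWS_alt (Pdf_SWS_Ids : List String) (Excel_SWS_Ids : List String) : List String :=
  if Pdf_SWS_Ids.contains "" then []
  else
    let index := pvBuildIdx Pdf_SWS_Ids
    Excel_SWS_Ids.foldl
      (fun missing e => if pvScan index e then missing else missing ++ [e])
      []

-- ===== PRECONDITION & SPEC =====
def Spec_missingInSWS (Pdf_SWS_Ids : List String) (Excel_SWS_Ids : List String) (out : List String) : Prop := out = missingInSWS_alt Pdf_SWS_Ids Excel_SWS_Ids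
instance (Pdf_SWS_Ids : List String) (Excel_SWS_Ids : List String) (out : List String) : Decidable (Spec_missingInSWS Pdf_SWS_Ids Excel_SWS_Ids out) := by unfold Spec_missingInSWS; infer_instance

-- ===== CLAIM (what is proved, stated in full; the proofs are below) =====
def Claim_equal_missingInSWS : Prop := ∀ (Pdf_SWS_Ids : List String) (Excel_SWS_Ids : List String), Dom_missingInSWS Pdf_SWS_Ids Excel_SWS_Ids → Spec_missingInSWS Pdf_SWS_Ids Excel_SWS_Ids (missingInSWS Pdf_SWS_Ids Excel_SWS_Ids)

-- ===== LEMMAS AND PROOFS =====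

-- A's inner loop finds a pattern iff some pattern is an infix.
theorem pvFound_iff (pdfs : List String) (e : String) :
    pvFound pdfs e = true ↔ ∃ p ∈ pdfs, p.toList <:+: e.toList := by
  induction pdfs with
  | nil => simp [pvFound]
  | cons q rest ih =>
      unfold pvFound
      by_cases h : PySem.Str.isIn q e = true
      · simp only [h, if_true]
        constructor
        · intro _; exact ⟨q, List.mem_cons_self, (PySem.Str.isIn_iff_infix q e).mp h⟩
        · intro _; trivial
      · rw [Bool.not_eq_true] at h
        simp only [h, Bool.false_eq_true, if_false]
        rw [ih]
        constructor
        · rintro ⟨p, hp, hinf⟩; exact ⟨p, List.mem_cons_of_mem _ hp, hinf⟩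
        · rintro ⟨p, hp, hinf⟩
          rcases List.mem_cons.mp hp with rfl | hp'
          · exact absurd ((PySem.Str.isIn_iff_infix p e).mpr hinf) (by simp_all)
          · exact ⟨p, hp', hinf⟩

-- The bucket under key c holds exactly the pdf ids whose first character is c.
theorem pvBuildIdx_getD (pdfs : List String) (d : PySem.Dict Char (List String)) (c : Char) :
    (pdfs.foldl
      (fun index p =>
        match p.toList with
        | [] => index
        | c' :: _ => index.insert c' (index.getD c' [] ++ [p]))
      d).getD c []
    = d.getD c [] ++ pdfs.filter (fun p => p.toList.head? == some c) := by
  induction pdfs generalizing d with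
  | nil => simp
  | cons p rest ih =>
      simp only [List.foldl_cons, List.filter_cons]
      cases hp : p.toList with
      | nil => simpa using ih d
      | cons c' t =>
          rw [ih]
          by_cases hc : c = c'
          · subst hc
            rw [PySem.Dict.getD_insert]
            simp
          · rw [PySem.Dict.getD_insert]
            simp [hc, Ne.symm hc]

theorem pvBucket_mem (pdfs : List String) (c : Char) (p : String) :
    p ∈ (pvBuildIdx pdfs).getD c [] ↔ p ∈ pdfs ∧ p.toList.head? = some c := by
  unfold pvBuildIdx
  rw [pvBuildIdx_getD]
  simp [PySem.Dict.empty, PySem.Dict.getD, PySem.Dict.get?, List.mem_filter]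

-- toList-emptiness transfers to the string literal "".
theorem pv_toList_nil {p : String} (h : p.toList = []) : p = "" := by
  apply String.ext; simpa using h

-- Per-string agreement of the two inner loops, when no pattern is empty.
theorem pvScan_eq_pvFound (pdfs : List String) (hne : "" ∉ pdfs) (e : String) :
    pvScan (pvBuildIdx pdfs) e = pvFound pdfs e := by
  rw [Bool.eq_iff_iff, pvFound_iff]
  unfold pvScan
  simp only [List.any_eq_true, List.mem_range]
  constructor
  · rintro ⟨i, hi, p, hp, hsw⟩
    refine ⟨p, (pvBucket_mem pdfs _ p |>.mp hp).1, ?_⟩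
    exact (PySem.Chars.isIn_iff_infix _ _).mp
      ((PySem.Chars.exists_prefix_drop_iff_isIn p.toList e.toList).mp
        ⟨i, (PySem.Chars.startswith_iff _ _).mp hsw⟩)
  · rintro ⟨p, hp, hinf⟩
    have hpne : p.toList ≠ [] := fun h => hne (pv_toList_nil h ▸ hp)
    obtain ⟨j, hj⟩ := (PySem.Chars.exists_prefix_drop_iff_isIn p.toList e.toList).mpr
      ((PySem.Chars.isIn_iff_infix p.toList e.toList).mpr hinf)
    have hjlt : j < e.toList.length := by
      by_contra hge
      have : e.toList.drop j = [] := List.drop_eq_nil_of_le (by omega)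
      rw [this] at hj
      exact hpne (List.prefix_nil.mp hj)
    refine ⟨j, hjlt, p, ?_, (PySem.Chars.startswith_iff _ _).mpr hj⟩
    rw [pvBucket_mem]
    refine ⟨hp, ?_⟩
    -- the first character of p is e[j]
    have h1 : p.toList.head? = (e.toList.drop j).head? := by
      cases hpl : p.toList with
      | nil => exact absurd hpl hpne
      | cons c t =>
          obtain ⟨u, hu⟩ := hj
          rw [hpl] at hu
          rw [← hu]; simp
    rw [h1, List.head?_drop, List.getElem?_eq_getElem hjlt,
        List.getD_eq_getElem _ _ hjlt]

-- If "" is among the patterns, A's loop always finds one.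
theorem pvFound_of_empty (pdfs : List String) (h : "" ∈ pdfs) (e : String) :
    pvFound pdfs e = true := by
  induction pdfs with
  | nil => simp at h
  | cons q rest ih =>
      unfold pvFound
      rcases List.mem_cons.mp h with rfl | h'
      · simp [PySem.Chars.isIn_nil]
      · by_cases hq : PySem.Str.isIn q e = true <;> simp [ih h']

theorem pv_foldA_const_true (pdfs : List String) (e : List String) (acc : List String)
    (h : ∀ x ∈ e, pvFound pdfs x = true) :
    e.foldl
      (fun MissingIds x =>
        if pvFound pdfs x = false then MissingIds ++ [x] else MissingIds) acc = acc := by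
  induction e generalizing acc with
  | nil => rfl
  | cons x t ih =>
      simp only [List.foldl_cons, h x List.mem_cons_self]
      exact ih acc (fun y hy => h y (List.mem_cons_of_mem _ hy))

theorem pv_fold_eq (pdfs : List String) (idx : PySem.Dict Char (List String))
    (h : ∀ x, pvScan idx x = pvFound pdfs x) (e : List String) (acc : List String) :
    e.foldl
      (fun MissingIds x =>
        if pvFound pdfs x = false then MissingIds ++ [x] else MissingIds) acc
    = e.foldl (fun missing x => if pvScan idx x then missing else missing ++ [x]) acc := by
  induction e generalizing acc with
  | nil => rfl
  | cons x t ih =>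
      simp only [List.foldl_cons, h x]
      cases hx : pvFound pdfs x <;> simp [ih]

-- ===== VERDICT (by name: the statement is the Claim_ definition above) =====
theorem missingInSWS_spec : Claim_equal_missingInSWS := by
  intro pdfs excels _
  unfold Spec_missingInSWS missingInSWS missingInSWS_alt
  by_cases hmem : "" ∈ pdfs
  · simp only [List.contains_iff_mem.mpr hmem, if_true]
    exact pv_foldA_const_true pdfs excels [] (fun x _ => pvFound_of_empty pdfs hmem x)
  · have : pdfs.contains "" = false := by
      simp [hmem]
    simp only [this, Bool.false_eq_true, if_false]
    exact pv_fold_eq pdfs (pvBuildIdx pdfs)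
      (fun x => pvScan_eq_pvFound pdfs hmem x) excels []
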